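-- pv_equiv track=rewrite | github.com/alaydeliwala/mbox-to-csv | mbox_parser.py | breakdown_contents
-- ===== SOURCE A (Python) =====
-- def breakdown_contents(contents):
--     name1 = ""
--     email1 = ""
--     topic1 = ""
--     subject1 = ""
--     message1 = ""
--     phone1 = ""
--
--     # Split the message into lines
--     lines = contents.split("\n\n")
--
--     # Iterate through the lines
--     for line1 in lines:
--         line = line1.strip()
--         if line.startswith("Name:"):
--             name1 = line.split(":")[1].strip()
--         elif line.startswith("Email Address:"):
--             email1 = line.split(":")[1].strip()
--         elif line.startswith("Topic:"):
--             topic1 = line.split(":")[1].strip()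
--         elif line.startswith("Subject:"):
--             subject1 = line.split(":")[1].strip()
--         elif line.startswith("Message:"):
--             message1 = line.split(":")[1].strip()
--         elif line.startswith("Phone:"):
--             phone1 = line.split(":")[1].strip()
--
--     # Split the message into lines
--     lines = contents.split("\n")
--
--     # Iterate through the lines
--     for line1 in lines:
--         line = line1.strip()
--
--         if line.startswith("Name:"):
--             if line.split(":")[1].strip() != "":
--                 name1 = line.split(":")[1].strip()
--         elif line.startswith("Email Address:"):
--             if line.split(":")[1].strip() != "":
--                 email1 = line.split(":")[1].strip()
--         elif line.startswith("Topic:") or line.startswith("Type of Service Requested:"):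
--             if line.split(":")[1].strip() != "":
--                 topic1 = line.split(":")[1].strip()
--         elif line.startswith("Subject:"):
--             if line.split(":")[1].strip() != "":
--                 subject1 = line.split(":")[1].strip()
--         elif line.startswith("Message:"):
--             if line.split(":")[1].strip() != "":
--                 message1 = line.split(":")[1].strip()
--         elif line.startswith("Phone:"):
--             if line.split(":")[1].strip() != "":
--                 phone1 = line.split(":")[1].strip()
--
--     return name1, email1, phone1, topic1, subject1, message1
-- ===== SOURCE B (Python) =====
-- # Per-field reverse search: instead of a two-pass mutable-state scan, each field is
-- # computed independently as "first acceptable match scanning the lines from the end"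
-- # (last-match-wins), falling back to the last paragraph-level match, then "".
--
-- def _value_of(line, prefixes):
--     for p in prefixes:
--         if line.startswith(p):
--             return line.split(":")[1].strip()
--     return None
--
--
-- def _last(lines, prefixes, require_nonempty):
--     for raw in reversed(lines):
--         v = _value_of(raw.strip(), prefixes)
--         if v is not None and (v != "" or not require_nonempty):
--             return v
--     return None
--
--
-- def _field(paras, lines, p1, p2):
--     v = _last(lines, p2, True)
--     if v is None:
--         v = _last(paras, p1, False)
--     return v if v is not None else ""
--
--
-- def breakdown_contents(contents):
--     paras = contents.split("\n\n")
--     lines = contents.split("\n")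
--     return (_field(paras, lines, ["Name:"], ["Name:"]),
--             _field(paras, lines, ["Email Address:"], ["Email Address:"]),
--             _field(paras, lines, ["Phone:"], ["Phone:"]),
--             _field(paras, lines, ["Topic:"], ["Topic:", "Type of Service Requested:"]),
--             _field(paras, lines, ["Subject:"], ["Subject:"]),
--             _field(paras, lines, ["Message:"], ["Message:"]))
-- ===== Notes on version B (the rewrite author's own statement) =====
-- stated objective: alternative
-- what changed: Replaces A's two-pass mutable six-variable state machine by six independent per-field queries: each field is the first acceptable match scanning the split lines in REVERSE (last-match-wins becomes first-match-from-the-end with early exit), falling back to the last paragraph-level match and then to the empty string; there is no shared mutable state and no field is ever overwritten.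
import Mathlib
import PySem

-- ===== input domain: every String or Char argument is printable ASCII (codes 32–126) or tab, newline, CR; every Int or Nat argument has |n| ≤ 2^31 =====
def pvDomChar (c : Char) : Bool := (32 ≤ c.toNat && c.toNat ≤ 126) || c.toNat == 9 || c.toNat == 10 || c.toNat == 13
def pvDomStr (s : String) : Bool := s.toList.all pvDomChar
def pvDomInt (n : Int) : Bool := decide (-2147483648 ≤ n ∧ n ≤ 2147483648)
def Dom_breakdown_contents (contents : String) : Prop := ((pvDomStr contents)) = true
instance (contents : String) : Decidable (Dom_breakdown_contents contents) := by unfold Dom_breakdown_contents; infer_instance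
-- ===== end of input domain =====

-- B replaces A's two-pass mutable six-field state machine by six independent per-field
-- reverse searches (first acceptable match from the end; objective: alternative).

-- ===== PORT A =====
-- line.split(":")[1].strip(); the [1] is guarded by startswith on a prefix containing ':',
-- so the index is always in range and the pyGetD default is unreachable.
def pvExtractA (line : String) : String :=
  PySem.Str.strip (PySem.List.pyGetD (((PySem.Str.split? line ":").getD [])) 1 "")

-- state (name1, email1, topic1, subject1, message1, phone1) in A's declaration order
def pvStepA1 (st : String × String × String × String × String × String) (line1 : String) :
    String × String × String × String × String × String :=
  match st with
  | (name1, email1, topic1, subject1, message1, phone1) =>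
    let line := PySem.Str.strip line1
    if PySem.Str.startswith line "Name:" then (pvExtractA line, email1, topic1, subject1, message1, phone1)
    else if PySem.Str.startswith line "Email Address:" then (name1, pvExtractA line, topic1, subject1, message1, phone1)
    else if PySem.Str.startswith line "Topic:" then (name1, email1, pvExtractA line, subject1, message1, phone1)
    else if PySem.Str.startswith line "Subject:" then (name1, email1, topic1, pvExtractA line, message1, phone1)
    else if PySem.Str.startswith line "Message:" then (name1, email1, topic1, subject1, pvExtractA line, phone1)
    else if PySem.Str.startswith line "Phone:" then (name1, email1, topic1, subject1, message1, pvExtractA line)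
    else (name1, email1, topic1, subject1, message1, phone1)

def pvStepA2 (st : String × String × String × String × String × String) (line1 : String) :
    String × String × String × String × String × String :=
  match st with
  | (name1, email1, topic1, subject1, message1, phone1) =>
    let line := PySem.Str.strip line1
    if PySem.Str.startswith line "Name:" then
      (if pvExtractA line ≠ "" then (pvExtractA line, email1, topic1, subject1, message1, phone1)
       else (name1, email1, topic1, subject1, message1, phone1))
    else if PySem.Str.startswith line "Email Address:" then
      (if pvExtractA line ≠ "" then (name1, pvExtractA line, topic1, subject1, message1, phone1)
       else (name1, email1, topic1, subject1, message1, phone1))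
    else if PySem.Str.startswith line "Topic:" || PySem.Str.startswith line "Type of Service Requested:" then
      (if pvExtractA line ≠ "" then (name1, email1, pvExtractA line, subject1, message1, phone1)
       else (name1, email1, topic1, subject1, message1, phone1))
    else if PySem.Str.startswith line "Subject:" then
      (if pvExtractA line ≠ "" then (name1, email1, topic1, pvExtractA line, message1, phone1)
       else (name1, email1, topic1, subject1, message1, phone1))
    else if PySem.Str.startswith line "Message:" then
      (if pvExtractA line ≠ "" then (name1, email1, topic1, subject1, pvExtractA line, phone1)
       else (name1, email1, topic1, subject1, message1, phone1))
    else if PySem.Str.startswith line "Phone:" then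
      (if pvExtractA line ≠ "" then (name1, email1, topic1, subject1, message1, pvExtractA line)
       else (name1, email1, topic1, subject1, message1, phone1))
    else (name1, email1, topic1, subject1, message1, phone1)

def breakdown_contents (contents : String) : String × String × String × String × String × String :=
  match (((PySem.Str.split? contents "\n").getD [])).foldl pvStepA2
      ((((PySem.Str.split? contents "\n\n").getD [])).foldl pvStepA1 ("", "", "", "", "", "")) with
  | (name1, email1, topic1, subject1, message1, phone1) =>
    (name1, email1, phone1, topic1, subject1, message1)

-- ===== PORT B =====
-- line.split(":")[1].strip() as in Source B's _value_of; same in-range note as pvExtractA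
def pvExtractB (line : String) : String :=
  PySem.Str.strip (PySem.List.pyGetD (((PySem.Str.split? line ":").getD [])) 1 "")

-- _value_of: first matching prefix's extracted value, None if no prefix matches
def pvValueOf (line : String) : List String → Option String
  | [] => none
  | p :: ps => if PySem.Str.startswith line p then some (pvExtractB line) else pvValueOf line ps

-- the body of _last: 'for raw in reversed(lines)' ported as recursion over lines.reverse
def pvLastGo (ps : List String) (req : Bool) : List String → Option String
  | [] => none
  | raw :: rest =>
    match pvValueOf (PySem.Str.strip raw) ps with
    | some v => if v ≠ "" || !req then some v else pvLastGo ps req rest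
    | none => pvLastGo ps req rest

def pvLast (lines : List String) (ps : List String) (req : Bool) : Option String :=
  pvLastGo ps req lines.reverse

-- _field: last nonempty line-level match, else last paragraph-level match, else ""
def pvField (paras lines : List String) (p1 p2 : List String) : String :=
  match pvLast lines p2 true with
  | some v => v
  | none =>
    match pvLast paras p1 false with
    | some v => v
    | none => ""

def breakdown_contents_alt (contents : String) : String × String × String × String × String × String :=
  let paras := ((PySem.Str.split? contents "\n\n").getD [])
  let lines := ((PySem.Str.split? contents "\n").getD [])
  (pvField paras lines ["Name:"] ["Name:"],
   pvField paras lines ["Email Address:"] ["Email Address:"],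
   pvField paras lines ["Phone:"] ["Phone:"],
   pvField paras lines ["Topic:"] ["Topic:", "Type of Service Requested:"],
   pvField paras lines ["Subject:"] ["Subject:"],
   pvField paras lines ["Message:"] ["Message:"])

-- ===== PRECONDITION & SPEC =====
def Spec_breakdown_contents (contents : String) (out : String × String × String × String × String × String) : Prop := out = breakdown_contents_alt contents
instance (contents : String) (out : String × String × String × String × String × String) : Decidable (Spec_breakdown_contents contents out) := by unfold Spec_breakdown_contents; infer_instance

-- ===== CLAIM (what is proved, stated in full; the proofs are below) =====
def Claim_equal_breakdown_contents : Prop := ∀ (contents : String), Dom_breakdown_contents contents → Spec_breakdown_contents contents (breakdown_contents contents)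

-- ===== LEMMAS AND PROOFS =====

theorem pvExtractB_eq (line : String) : pvExtractB line = pvExtractA line := rfl

-- two incomparable prefixes cannot both start the same string
theorem pvExcl (l p q : String) (hp : PySem.Str.startswith l p = true)
    (h1 : ¬ p.toList <+: q.toList) (h2 : ¬ q.toList <+: p.toList) :
    PySem.Str.startswith l q = false := by
  have hp' : p.toList <+: l.toList := (PySem.Chars.startswith_iff _ _).mp (by simpa using hp)
  by_contra h
  have hq : PySem.Str.startswith l q = true := by
    cases hq : PySem.Str.startswith l q with
    | false => exact absurd hq h
    | true => rfl
  have hq' : q.toList <+: l.toList := (PySem.Chars.startswith_iff _ _).mp (by simpa using hq)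
  rcases List.prefix_or_prefix_of_prefix hp' hq' with h3 | h3
  · exact h1 h3
  · exact h2 h3

theorem pvLast_nil (ps : List String) (req : Bool) : pvLast [] ps req = none := rfl

theorem pvLast_append_singleton (xs : List String) (x : String) (ps : List String) (req : Bool) :
    pvLast (xs ++ [x]) ps req =
      match pvValueOf (PySem.Str.strip x) ps with
      | some v => if v ≠ "" || !req then some v else pvLast xs ps req
      | none => pvLast xs ps req := by
  simp only [pvLast, List.reverse_append, List.reverse_singleton, List.singleton_append, pvLastGo]

-- characterization of A's second pass as six independent reverse searches
theorem pvFold2_char (lines : List String) (n e t s m p : String) :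
    lines.foldl pvStepA2 (n, e, t, s, m, p) =
      ((pvLast lines ["Name:"] true).getD n,
       (pvLast lines ["Email Address:"] true).getD e,
       (pvLast lines ["Topic:", "Type of Service Requested:"] true).getD t,
       (pvLast lines ["Subject:"] true).getD s,
       (pvLast lines ["Message:"] true).getD m,
       (pvLast lines ["Phone:"] true).getD p) := by
  induction lines using List.reverseRecOn with
  | nil => simp [pvLast_nil]
  | append_singleton xs x ih =>
    rw [List.foldl_append, ih, List.foldl_cons, List.foldl_nil]
    simp only [pvStepA2, pvLast_append_singleton, pvValueOf]
    set L := PySem.Str.strip x with hL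
    by_cases hN : PySem.Str.startswith L "Name:"
    · have e1 := pvExcl L "Name:" "Email Address:" hN (by decide) (by decide)
      have e2 := pvExcl L "Name:" "Topic:" hN (by decide) (by decide)
      have e3 := pvExcl L "Name:" "Type of Service Requested:" hN (by decide) (by decide)
      have e4 := pvExcl L "Name:" "Subject:" hN (by decide) (by decide)
      have e5 := pvExcl L "Name:" "Message:" hN (by decide) (by decide)
      have e6 := pvExcl L "Name:" "Phone:" hN (by decide) (by decide)
      simp only [hN, e1, e2, e3, e4, e5, e6, if_true, Bool.or_self, Bool.not_true,
        Bool.or_false, pvExtractB_eq]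
      by_cases hv : pvExtractA L = "" <;> simp [hv]
    · by_cases hE : PySem.Str.startswith L "Email Address:"
      · have e1 := pvExcl L "Email Address:" "Name:" hE (by decide) (by decide)
        have e2 := pvExcl L "Email Address:" "Topic:" hE (by decide) (by decide)
        have e3 := pvExcl L "Email Address:" "Type of Service Requested:" hE (by decide) (by decide)
        have e4 := pvExcl L "Email Address:" "Subject:" hE (by decide) (by decide)
        have e5 := pvExcl L "Email Address:" "Message:" hE (by decide) (by decide)
        have e6 := pvExcl L "Email Address:" "Phone:" hE (by decide) (by decide)
        simp only [hE, e1, e2, e3, e4, e5, e6, if_true, Bool.not_true,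
          Bool.or_false, pvExtractB_eq]
        by_cases hv : pvExtractA L = "" <;> simp [hv]
      · by_cases hT : PySem.Str.startswith L "Topic:"
        · have e1 := pvExcl L "Topic:" "Subject:" hT (by decide) (by decide)
          have e2 := pvExcl L "Topic:" "Message:" hT (by decide) (by decide)
          have e3 := pvExcl L "Topic:" "Phone:" hT (by decide) (by decide)
          simp only [hN, hE, hT, e1, e2, e3, if_true, Bool.true_or, Bool.not_true,
            Bool.or_false, pvExtractB_eq]
          by_cases hv : pvExtractA L = "" <;> simp [hv]
        · by_cases hY : PySem.Str.startswith L "Type of Service Requested:"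
          · have e1 := pvExcl L "Type of Service Requested:" "Subject:" hY (by decide) (by decide)
            have e2 := pvExcl L "Type of Service Requested:" "Message:" hY (by decide) (by decide)
            have e3 := pvExcl L "Type of Service Requested:" "Phone:" hY (by decide) (by decide)
            simp only [hN, hE, hT, hY, e1, e2, e3, if_true, Bool.false_or, Bool.not_true,
              Bool.or_false, pvExtractB_eq]
            by_cases hv : pvExtractA L = "" <;> simp [hv]
          · by_cases hS : PySem.Str.startswith L "Subject:"
            · have e1 := pvExcl L "Subject:" "Message:" hS (by decide) (by decide)
              have e2 := pvExcl L "Subject:" "Phone:" hS (by decide) (by decide)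
              simp only [hN, hE, hT, hY, hS, e1, e2, if_true, Bool.or_self, Bool.not_true,
                Bool.or_false, pvExtractB_eq]
              by_cases hv : pvExtractA L = "" <;> simp [hv]
            · by_cases hM : PySem.Str.startswith L "Message:"
              · have e1 := pvExcl L "Message:" "Phone:" hM (by decide) (by decide)
                simp only [hN, hE, hT, hY, hS, hM, e1, if_true, Bool.or_self,
                  Bool.not_true, Bool.or_false, pvExtractB_eq]
                by_cases hv : pvExtractA L = "" <;> simp [hv]
              · by_cases hP : PySem.Str.startswith L "Phone:"
                · simp only [hN, hE, hT, hY, hS, hM, hP, if_true, Bool.or_self,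
                    Bool.not_true, Bool.or_false, pvExtractB_eq]
                  by_cases hv : pvExtractA L = "" <;> simp [hv]
                · simp at hN hE hT hY hS hM hP
                  simp [hN, hE, hT, hY, hS, hM, hP]

-- characterization of A's first pass
theorem pvFold1_char (lines : List String) (n e t s m p : String) :
    lines.foldl pvStepA1 (n, e, t, s, m, p) =
      ((pvLast lines ["Name:"] false).getD n,
       (pvLast lines ["Email Address:"] false).getD e,
       (pvLast lines ["Topic:"] false).getD t,
       (pvLast lines ["Subject:"] false).getD s,
       (pvLast lines ["Message:"] false).getD m,
       (pvLast lines ["Phone:"] false).getD p) := by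
  induction lines using List.reverseRecOn with
  | nil => simp [pvLast_nil]
  | append_singleton xs x ih =>
    rw [List.foldl_append, ih, List.foldl_cons, List.foldl_nil]
    simp only [pvStepA1, pvLast_append_singleton, pvValueOf]
    set L := PySem.Str.strip x with hL
    by_cases hN : PySem.Str.startswith L "Name:"
    · have e1 := pvExcl L "Name:" "Email Address:" hN (by decide) (by decide)
      have e2 := pvExcl L "Name:" "Topic:" hN (by decide) (by decide)
      have e4 := pvExcl L "Name:" "Subject:" hN (by decide) (by decide)
      have e5 := pvExcl L "Name:" "Message:" hN (by decide) (by decide)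
      have e6 := pvExcl L "Name:" "Phone:" hN (by decide) (by decide)
      simp at hN e1 e2 e4 e5 e6
      simp [hN, e1, e2, e4, e5, e6, pvExtractB_eq]
    · by_cases hE : PySem.Str.startswith L "Email Address:"
      · have e2 := pvExcl L "Email Address:" "Topic:" hE (by decide) (by decide)
        have e4 := pvExcl L "Email Address:" "Subject:" hE (by decide) (by decide)
        have e5 := pvExcl L "Email Address:" "Message:" hE (by decide) (by decide)
        have e6 := pvExcl L "Email Address:" "Phone:" hE (by decide) (by decide)
        simp at hN hE e2 e4 e5 e6
        simp [hN, hE, e2, e4, e5, e6, pvExtractB_eq]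
      · by_cases hT : PySem.Str.startswith L "Topic:"
        · have e4 := pvExcl L "Topic:" "Subject:" hT (by decide) (by decide)
          have e5 := pvExcl L "Topic:" "Message:" hT (by decide) (by decide)
          have e6 := pvExcl L "Topic:" "Phone:" hT (by decide) (by decide)
          simp at hN hE hT e4 e5 e6
          simp [hN, hE, hT, e4, e5, e6, pvExtractB_eq]
        · by_cases hS : PySem.Str.startswith L "Subject:"
          · have e5 := pvExcl L "Subject:" "Message:" hS (by decide) (by decide)
            have e6 := pvExcl L "Subject:" "Phone:" hS (by decide) (by decide)
            simp at hN hE hT hS e5 e6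
            simp [hN, hE, hT, hS, e5, e6, pvExtractB_eq]
          · by_cases hM : PySem.Str.startswith L "Message:"
            · have e6 := pvExcl L "Message:" "Phone:" hM (by decide) (by decide)
              simp at hN hE hT hS hM e6
              simp [hN, hE, hT, hS, hM, e6, pvExtractB_eq]
            · by_cases hP : PySem.Str.startswith L "Phone:"
              · simp at hN hE hT hS hM hP
                simp [hN, hE, hT, hS, hM, hP, pvExtractB_eq]
              · simp at hN hE hT hS hM hP
                simp [hN, hE, hT, hS, hM, hP]

theorem pvField_eq (paras lines : List String) (p1 p2 : List String) :
    pvField paras lines p1 p2 = (pvLast lines p2 true).getD ((pvLast paras p1 false).getD "") := by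
  unfold pvField
  cases pvLast lines p2 true <;> cases pvLast paras p1 false <;> rfl

-- ===== VERDICT (by name: the statement is the Claim_ definition above) =====
theorem breakdown_contents_spec : Claim_equal_breakdown_contents := by
  intro contents _
  unfold Spec_breakdown_contents breakdown_contents breakdown_contents_alt
  rw [pvFold1_char, pvFold2_char]
  simp only [pvField_eq]
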